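-- pv_equiv track=rewrite | github.com/alfatti/CM_thoughts | ablation.py | _resolve_groups
-- ===== SOURCE A (Python) =====
-- from typing import Callable, Dict, List, Optional, Tuple, Union
--
-- def _resolve_groups(columns: List[str]) -> Dict[str, List[str]]:
--     """
--     Assign every feature column to exactly one group based on slim-pipeline
--     naming conventions.  TX_COUNT is split out from AMOUNT intentionally.
--     """
--     def pick(patterns):
--         return [c for c in columns
--                 if any(c.startswith(p) or p in c for p in patterns)]
--
--     groups = {
--         "AMOUNT":    pick(["amt_", "is_round_amount"]),
--         "RECEIVER":  pick(["recv_"]),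
--         "PORTFOLIO": pick(["port_", "tx_share_of_daily_vol", "vol_7d_vs_30d"]),
--         "TEMPORAL":  pick(["is_weekend", "is_off_hours", "seconds_since_last_tx",
--                            "gap_zscore", "tx_count_24h", "velocity_7d_vs_30d"]),
--         "CURRENCY":  pick(["ccy_", "currency_switched"]),
--         "COMPOSITE": pick(["flag_"]),
--     }
--
--     tx_count_cols      = [c for c in groups["AMOUNT"] if c.endswith("_tx_count")]
--     groups["AMOUNT"]   = [c for c in groups["AMOUNT"] if c not in tx_count_cols]
--     groups["TX_COUNT"] = tx_count_cols
--
--     seen = set()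
--     for name in list(groups):
--         groups[name] = [c for c in groups[name] if c not in seen]
--         seen.update(groups[name])
--         if not groups[name]:
--             del groups[name]
--
--     return groups
-- ===== SOURCE B (Python) =====
-- def _resolve_groups(columns):
--     """One pass: each column joins the FIRST group whose naming rule it matches,
--     in precedence order AMOUNT (non-tx-count), RECEIVER, PORTFOLIO, TEMPORAL,
--     CURRENCY, COMPOSITE, TX_COUNT; empty groups are dropped."""
--     def _amt(c):
--         return "amt_" in c or "is_round_amount" in c
--
--     rules = [
--         ("AMOUNT",    lambda c: _amt(c) and not c.endswith("_tx_count")),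
--         ("RECEIVER",  lambda c: "recv_" in c),
--         ("PORTFOLIO", lambda c: "port_" in c or "tx_share_of_daily_vol" in c
--                                 or "vol_7d_vs_30d" in c),
--         ("TEMPORAL",  lambda c: "is_weekend" in c or "is_off_hours" in c
--                                 or "seconds_since_last_tx" in c or "gap_zscore" in c
--                                 or "tx_count_24h" in c or "velocity_7d_vs_30d" in c),
--         ("CURRENCY",  lambda c: "ccy_" in c or "currency_switched" in c),
--         ("COMPOSITE", lambda c: "flag_" in c),
--         ("TX_COUNT",  lambda c: _amt(c) and c.endswith("_tx_count")),
--     ]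
--     buckets = {name: [] for name, _ in rules}
--     for c in columns:
--         for name, pred in rules:
--             if pred(c):
--                 buckets[name].append(c)
--                 break
--     return {name: cols for name, cols in buckets.items() if cols}
-- ===== Notes on version B (the rewrite author's own statement) =====
-- stated objective: faster
-- what changed: A builds seven per-group filter passes over the columns, splits AMOUNT into AMOUNT/TX_COUNT by a quadratic 'c not in tx_count_cols' list scan, and then dedups overlapping groups with a seen-set sweep; B makes ONE pass over the columns, appending each column to the first group whose naming rule matches (precedence AMOUNT-non-tx, RECEIVER, PORTFOLIO, TEMPORAL, CURRENCY, COMPOSITE, TX_COUNT), then drops empty groups.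
import Mathlib
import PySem

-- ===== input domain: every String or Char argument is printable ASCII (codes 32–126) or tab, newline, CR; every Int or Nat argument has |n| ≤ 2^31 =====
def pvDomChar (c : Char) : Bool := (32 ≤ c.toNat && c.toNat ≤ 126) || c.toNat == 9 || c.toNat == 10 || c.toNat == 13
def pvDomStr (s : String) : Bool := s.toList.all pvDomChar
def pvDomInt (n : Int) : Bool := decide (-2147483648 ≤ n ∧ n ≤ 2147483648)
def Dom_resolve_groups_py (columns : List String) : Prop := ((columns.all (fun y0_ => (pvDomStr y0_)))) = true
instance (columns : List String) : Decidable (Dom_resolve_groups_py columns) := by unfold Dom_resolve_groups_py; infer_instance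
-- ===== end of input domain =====

-- B replaces A's seven pick passes + quadratic AMOUNT/TX_COUNT split + dedup sweep by ONE pass
-- over the columns appending each column to the first group whose rule matches (objective: faster,
-- measured).

-- ===== PORT A =====
-- pick(patterns) from A: columns matching any pattern by startswith or substring
def pickA (columns : List String) (patterns : List String) : List String :=
  columns.filter (fun c => patterns.any (fun p => PySem.Str.startswith c p || PySem.Str.isIn p c))

-- one iteration of A's dedup loop body (state = (groups, seen))
def aStep (st : PySem.Dict String (List String) × PySem.Set String) (name : String) :
    PySem.Dict String (List String) × PySem.Set String :=
  let kept := (st.1.getD name []).filter (fun c => !(PySem.Set.contains st.2 c))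
  let seen := PySem.Set.update st.2 kept
  if kept.isEmpty then (st.1.erase name, seen) else (st.1.insert name kept, seen)

def resolve_groups_py (columns : List String) : List (String × List String) :=
  let groups0 : PySem.Dict String (List String) :=
    (((((PySem.Dict.empty.insert "AMOUNT" (pickA columns ["amt_", "is_round_amount"])).insert
        "RECEIVER" (pickA columns ["recv_"])).insert
        "PORTFOLIO" (pickA columns ["port_", "tx_share_of_daily_vol", "vol_7d_vs_30d"])).insert
        "TEMPORAL" (pickA columns ["is_weekend", "is_off_hours", "seconds_since_last_tx",
                                   "gap_zscore", "tx_count_24h", "velocity_7d_vs_30d"])).insert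
        "CURRENCY" (pickA columns ["ccy_", "currency_switched"])).insert
        "COMPOSITE" (pickA columns ["flag_"])
  let txCountCols := (groups0.getD "AMOUNT" []).filter (fun c => PySem.Str.endswith c "_tx_count")
  let groups1 := groups0.insert "AMOUNT"
      ((groups0.getD "AMOUNT" []).filter (fun c => !(txCountCols.contains c)))
  let groups2 := groups1.insert "TX_COUNT" txCountCols
  ((groups2.keys.foldl aStep (groups2, PySem.Set.empty)).1).items

-- ===== PORT B =====
def bAmt (c : String) : Bool := PySem.Str.isIn "amt_" c || PySem.Str.isIn "is_round_amount" c
def bAMOUNT (c : String) : Bool := bAmt c && !(PySem.Str.endswith c "_tx_count")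
def bRECEIVER (c : String) : Bool := PySem.Str.isIn "recv_" c
def bPORTFOLIO (c : String) : Bool :=
  PySem.Str.isIn "port_" c || PySem.Str.isIn "tx_share_of_daily_vol" c || PySem.Str.isIn "vol_7d_vs_30d" c
def bTEMPORAL (c : String) : Bool :=
  PySem.Str.isIn "is_weekend" c || PySem.Str.isIn "is_off_hours" c ||
  PySem.Str.isIn "seconds_since_last_tx" c || PySem.Str.isIn "gap_zscore" c ||
  PySem.Str.isIn "tx_count_24h" c || PySem.Str.isIn "velocity_7d_vs_30d" c
def bCURRENCY (c : String) : Bool := PySem.Str.isIn "ccy_" c || PySem.Str.isIn "currency_switched" c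
def bCOMPOSITE (c : String) : Bool := PySem.Str.isIn "flag_" c
def bTXCOUNT (c : String) : Bool := bAmt c && PySem.Str.endswith c "_tx_count"

-- the seven buckets, in B's fixed key order
structure BState where
  amount : List String
  receiver : List String
  portfolio : List String
  temporal : List String
  currency : List String
  composite : List String
  txcount : List String
deriving Repr, DecidableEq

-- B's inner loop: append c to the first group whose rule matches
def bStep (st : BState) (c : String) : BState :=
  if bAMOUNT c then { st with amount := st.amount ++ [c] }
  else if bRECEIVER c then { st with receiver := st.receiver ++ [c] }
  else if bPORTFOLIO c then { st with portfolio := st.portfolio ++ [c] }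
  else if bTEMPORAL c then { st with temporal := st.temporal ++ [c] }
  else if bCURRENCY c then { st with currency := st.currency ++ [c] }
  else if bCOMPOSITE c then { st with composite := st.composite ++ [c] }
  else if bTXCOUNT c then { st with txcount := st.txcount ++ [c] }
  else st

def resolve_groups_py_alt (columns : List String) : List (String × List String) :=
  let st := columns.foldl bStep ⟨[], [], [], [], [], [], []⟩
  [("AMOUNT", st.amount), ("RECEIVER", st.receiver), ("PORTFOLIO", st.portfolio),
   ("TEMPORAL", st.temporal), ("CURRENCY", st.currency), ("COMPOSITE", st.composite),
   ("TX_COUNT", st.txcount)].filter (fun kv => !kv.2.isEmpty)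

-- ===== PRECONDITION & SPEC =====
def Spec_resolve_groups_py (columns : List String) (out : List (String × List String)) : Prop := out = resolve_groups_py_alt columns
instance (columns : List String) (out : List (String × List String)) : Decidable (Spec_resolve_groups_py columns out) := by unfold Spec_resolve_groups_py; infer_instance

-- ===== CLAIM (what is proved, stated in full; the proofs are below) =====
def Claim_equal_resolve_groups_py : Prop := ∀ (columns : List String), Dom_resolve_groups_py columns → Spec_resolve_groups_py columns (resolve_groups_py columns)

-- ===== LEMMAS AND PROOFS =====

-- first-match predicates: pmI c ↔ B assigns c to bucket number I
def pm1 (c : String) : Bool := bAMOUNT c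
def pm2 (c : String) : Bool := !bAMOUNT c && bRECEIVER c
def pm3 (c : String) : Bool := !bAMOUNT c && !bRECEIVER c && bPORTFOLIO c
def pm4 (c : String) : Bool := !bAMOUNT c && !bRECEIVER c && !bPORTFOLIO c && bTEMPORAL c
def pm5 (c : String) : Bool := !bAMOUNT c && !bRECEIVER c && !bPORTFOLIO c && !bTEMPORAL c && bCURRENCY c
def pm6 (c : String) : Bool := !bAMOUNT c && !bRECEIVER c && !bPORTFOLIO c && !bTEMPORAL c && !bCURRENCY c && bCOMPOSITE c
def pm7 (c : String) : Bool := !bAMOUNT c && !bRECEIVER c && !bPORTFOLIO c && !bTEMPORAL c && !bCURRENCY c && !bCOMPOSITE c && bTXCOUNT c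

-- B's fold invariant
lemma bfold (columns : List String) (st : BState) :
    columns.foldl bStep st =
      ⟨st.amount ++ columns.filter pm1, st.receiver ++ columns.filter pm2,
       st.portfolio ++ columns.filter pm3, st.temporal ++ columns.filter pm4,
       st.currency ++ columns.filter pm5, st.composite ++ columns.filter pm6,
       st.txcount ++ columns.filter pm7⟩ := by
  induction columns generalizing st with
  | nil => simp
  | cons c cs ih =>
    simp only [List.foldl_cons, ih]
    unfold bStep
    split_ifs with h1 h2 h3 h4 h5 h6 h7 <;>
      simp_all [pm1, pm2, pm3, pm4, pm5, pm6, pm7]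

-- the pick predicate's startswith clause is subsumed by the substring clause
lemma swChars (c p : List Char) :
    (PySem.Chars.startswith c p || PySem.Chars.isIn p c) = PySem.Chars.isIn p c := by
  cases h : PySem.Chars.startswith c p with
  | false => simp
  | true =>
    have hin : PySem.Chars.isIn p c = true :=
      (PySem.Chars.isIn_iff_infix p c).mpr ((PySem.Chars.startswith_iff c p).mp h).isInfix
    simp [hin]

lemma pick_amt (columns : List String) :
    pickA columns ["amt_", "is_round_amount"] = columns.filter bAmt := by
  unfold pickA; exact List.filter_congr (fun c _ => by simp [bAmt, swChars])

lemma pick_recv (columns : List String) :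
    pickA columns ["recv_"] = columns.filter bRECEIVER := by
  unfold pickA; exact List.filter_congr (fun c _ => by simp [bRECEIVER, swChars])

lemma pick_port (columns : List String) :
    pickA columns ["port_", "tx_share_of_daily_vol", "vol_7d_vs_30d"] = columns.filter bPORTFOLIO := by
  unfold pickA; exact List.filter_congr (fun c _ => by simp [bPORTFOLIO, swChars, Bool.or_assoc])

lemma pick_temp (columns : List String) :
    pickA columns ["is_weekend", "is_off_hours", "seconds_since_last_tx",
                   "gap_zscore", "tx_count_24h", "velocity_7d_vs_30d"] = columns.filter bTEMPORAL := by
  unfold pickA; exact List.filter_congr (fun c _ => by simp [bTEMPORAL, swChars, Bool.or_assoc])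

lemma pick_ccy (columns : List String) :
    pickA columns ["ccy_", "currency_switched"] = columns.filter bCURRENCY := by
  unfold pickA; exact List.filter_congr (fun c _ => by simp [bCURRENCY, swChars])

lemma pick_flag (columns : List String) :
    pickA columns ["flag_"] = columns.filter bCOMPOSITE := by
  unfold pickA; exact List.filter_congr (fun c _ => by simp [bCOMPOSITE, swChars])

-- A's tx_count split, restated on whole-column filters
lemma tx_split (columns : List String) :
    (columns.filter bAmt).filter (fun c => PySem.Str.endswith c "_tx_count") =
      columns.filter bTXCOUNT := by
  rw [List.filter_filter]
  exact List.filter_congr (fun c _ => by simp [bTXCOUNT, Bool.and_comm])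

lemma amt_split (columns : List String) :
    (columns.filter bAmt).filter (fun c => !((columns.filter bTXCOUNT).contains c)) =
      columns.filter bAMOUNT := by
  rw [List.filter_filter]
  refine List.filter_congr (fun c hc => ?_)
  have hmem : (columns.filter bTXCOUNT).contains c = (bAmt c && PySem.Str.endswith c "_tx_count") := by
    rw [Bool.eq_iff_iff]
    simp [List.mem_filter, bTXCOUNT, hc]
  rw [hmem]
  cases ha : bAmt c <;> cases he : PySem.Str.endswith c "_tx_count" <;>
    simp only [bAMOUNT, ha, he] <;> rfl

-- literal dict computations for A's fixed seven keys
lemma dict6 (L1 L2 L3 L4 L5 L6 : List String) :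
    (((((PySem.Dict.empty.insert "AMOUNT" L1).insert "RECEIVER" L2).insert "PORTFOLIO" L3).insert
      "TEMPORAL" L4).insert "CURRENCY" L5).insert "COMPOSITE" L6
    = PySem.Dict.mk [("AMOUNT", L1), ("RECEIVER", L2), ("PORTFOLIO", L3), ("TEMPORAL", L4),
                     ("CURRENCY", L5), ("COMPOSITE", L6)] := rfl

lemma getd6 (L1 L2 L3 L4 L5 L6 : List String) :
    (PySem.Dict.mk [("AMOUNT", L1), ("RECEIVER", L2), ("PORTFOLIO", L3), ("TEMPORAL", L4),
                    ("CURRENCY", L5), ("COMPOSITE", L6)]).getD "AMOUNT" [] = L1 := rfl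

lemma dict7 (L1 L2 L3 L4 L5 L6 A' T : List String) :
    (((PySem.Dict.mk [("AMOUNT", L1), ("RECEIVER", L2), ("PORTFOLIO", L3), ("TEMPORAL", L4),
                      ("CURRENCY", L5), ("COMPOSITE", L6)]).insert "AMOUNT" A').insert "TX_COUNT" T)
    = PySem.Dict.mk [("AMOUNT", A'), ("RECEIVER", L2), ("PORTFOLIO", L3), ("TEMPORAL", L4),
                     ("CURRENCY", L5), ("COMPOSITE", L6), ("TX_COUNT", T)] := rfl

lemma keys7 (L1 L2 L3 L4 L5 L6 T : List String) :
    (PySem.Dict.mk [("AMOUNT", L1), ("RECEIVER", L2), ("PORTFOLIO", L3), ("TEMPORAL", L4),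
                    ("CURRENCY", L5), ("COMPOSITE", L6), ("TX_COUNT", T)]).keys
    = ["AMOUNT", "RECEIVER", "PORTFOLIO", "TEMPORAL", "CURRENCY", "COMPOSITE", "TX_COUNT"] := rfl

-- A's pure dedup sweep as a recursion over the association list
def dedupSpec : List (String × List String) → PySem.Set String → List (String × List String)
  | [], _ => []
  | (k, v) :: rest, seen =>
    let kept := v.filter (fun c => !(PySem.Set.contains seen c))
    (if kept.isEmpty then [] else [(k, kept)]) ++ dedupSpec rest (PySem.Set.update seen kept)

-- A's dedup loop over the keys of a dict with distinct keys = dedupSpec on the items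
lemma loop_items (rest : List (String × List String)) : ∀ (pre : List (String × List String))
    (ks : List String) (seen : PySem.Set String),
    ks = rest.map Prod.fst →
    ((pre ++ rest).map Prod.fst).Nodup →
    ((ks.foldl aStep (PySem.Dict.mk (pre ++ rest), seen)).1).items = pre ++ dedupSpec rest seen := by
  induction rest with
  | nil => intro pre ks seen hk _; subst hk; simp [dedupSpec]
  | cons kv rest ih =>
    intro pre ks seen hk hnd
    obtain ⟨k, v⟩ := kv
    subst hk
    have hnd' : (pre.map Prod.fst ++ k :: rest.map Prod.fst).Nodup := by simpa using hnd
    rcases List.nodup_append.mp hnd' with ⟨hP, hKR, hdisj⟩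
    have hkpre : ∀ p ∈ pre, (p.1 == k) = false := by
      intro p hp
      have hne : p.1 ≠ k := by
        intro e
        exact hdisj p.1 (List.mem_map_of_mem (f := Prod.fst) hp) k (List.mem_cons_self) e
      simp [hne]
    have hkrest : ∀ p ∈ rest, (p.1 == k) = false := by
      intro p hp
      have hknotin : k ∉ rest.map Prod.fst := (List.nodup_cons.mp hKR).1
      have hne : p.1 ≠ k := by
        intro e
        exact hknotin (e ▸ List.mem_map_of_mem (f := Prod.fst) hp)
      simp [hne]
    have hfn : List.find? (fun p => p.1 == k) pre = none :=
      List.find?_eq_none.mpr (fun p hp => by simp [hkpre p hp])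
    have hget : (PySem.Dict.mk (pre ++ (k, v) :: rest)).getD k [] = v := by
      simp [PySem.Dict.getD, PySem.Dict.get?, List.find?_append, hfn]
    simp only [List.map_cons, List.foldl_cons]
    simp only [aStep, hget]
    have hds : dedupSpec ((k, v) :: rest) seen =
        (if (v.filter (fun c => !(PySem.Set.contains seen c))).isEmpty then []
         else [(k, v.filter (fun c => !(PySem.Set.contains seen c)))]) ++
        dedupSpec rest (PySem.Set.update seen (v.filter (fun c => !(PySem.Set.contains seen c)))) := rfl
    have hfp : pre.filter (fun p => !(p.1 == k)) = pre :=
      List.filter_eq_self.mpr (fun p hp => by simp [hkpre p hp])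
    have hfr : rest.filter (fun p => !(p.1 == k)) = rest :=
      List.filter_eq_self.mpr (fun p hp => by simp [hkrest p hp])
    by_cases hke : (v.filter (fun c => !(PySem.Set.contains seen c))).isEmpty
    · -- erase branch
      have herase : ((PySem.Dict.mk (pre ++ (k, v) :: rest)).erase k) = PySem.Dict.mk (pre ++ rest) := by
        simp only [PySem.Dict.erase, List.filter_append, List.filter_cons]
        simp [hfp, hfr]
      rw [if_pos hke, herase,
          ih pre _ _ rfl (by
            refine hnd.sublist (List.Sublist.map _ ?_)
            exact (List.sublist_cons_self (k, v) rest).append_left pre)]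
      rw [hds, if_pos hke]
      simp
    · -- insert branch
      have hcont : (PySem.Dict.mk (pre ++ (k, v) :: rest)).contains k = true := by
        simp [PySem.Dict.contains, List.any_append]
      have hmp : pre.map (fun p => if p.1 == k then (k, v.filter (fun c => !(PySem.Set.contains seen c))) else p) = pre := by
        rw [List.map_congr_left (g := id) (fun p hp => by simp [hkpre p hp])]
        exact List.map_id pre
      have hmr : rest.map (fun p => if p.1 == k then (k, v.filter (fun c => !(PySem.Set.contains seen c))) else p) = rest := by
        rw [List.map_congr_left (g := id) (fun p hp => by simp [hkrest p hp])]
        exact List.map_id rest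
      have hins : ((PySem.Dict.mk (pre ++ (k, v) :: rest)).insert k
            (v.filter (fun c => !(PySem.Set.contains seen c))))
          = PySem.Dict.mk ((pre ++ [(k, v.filter (fun c => !(PySem.Set.contains seen c)))]) ++ rest) := by
        simp only [PySem.Dict.insert, hcont, if_pos]
        congr 1
        simp only [List.map_append, List.map_cons]
        rw [hmp, hmr]
        simp
      rw [if_neg hke, hins,
          ih (pre ++ [(k, v.filter (fun c => !(PySem.Set.contains seen c)))]) _ _ rfl (by
            simpa using hnd')]
      rw [hds, if_neg hke]
      simp

-- membership of the evolving `seen` set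
lemma contains_update_filter (s : PySem.Set String) (columns : List String) (f : String → Bool) (c : String) :
    PySem.Set.contains (PySem.Set.update s (columns.filter f)) c
      = (PySem.Set.contains s c || (decide (c ∈ columns) && f c)) := by
  rw [Bool.eq_iff_iff]
  simp [PySem.Set.mem_update, List.mem_filter]

lemma contains_empty (c : String) : PySem.Set.contains PySem.Set.empty c = false := rfl

lemma kept_eq (columns : List String) (g pmN : String → Bool) (seen : PySem.Set String)
    (h : ∀ c ∈ columns, (!(PySem.Set.contains seen c) && g c) = pmN c) :
    (columns.filter g).filter (fun c => !(PySem.Set.contains seen c)) = columns.filter pmN := by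
  rw [List.filter_filter]
  exact List.filter_congr h

-- evaluation of the dedup sweep on A's seven groups
lemma dedup_eval (columns : List String) :
    dedupSpec [("AMOUNT", columns.filter bAMOUNT), ("RECEIVER", columns.filter bRECEIVER),
               ("PORTFOLIO", columns.filter bPORTFOLIO), ("TEMPORAL", columns.filter bTEMPORAL),
               ("CURRENCY", columns.filter bCURRENCY), ("COMPOSITE", columns.filter bCOMPOSITE),
               ("TX_COUNT", columns.filter bTXCOUNT)] PySem.Set.empty
    = (if (columns.filter pm1).isEmpty then [] else [("AMOUNT", columns.filter pm1)]) ++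
      ((if (columns.filter pm2).isEmpty then [] else [("RECEIVER", columns.filter pm2)]) ++
      ((if (columns.filter pm3).isEmpty then [] else [("PORTFOLIO", columns.filter pm3)]) ++
      ((if (columns.filter pm4).isEmpty then [] else [("TEMPORAL", columns.filter pm4)]) ++
      ((if (columns.filter pm5).isEmpty then [] else [("CURRENCY", columns.filter pm5)]) ++
      ((if (columns.filter pm6).isEmpty then [] else [("COMPOSITE", columns.filter pm6)]) ++
      ((if (columns.filter pm7).isEmpty then [] else [("TX_COUNT", columns.filter pm7)]) ++ [])))))) := by
  have h1 : ∀ c ∈ columns, (!(PySem.Set.contains PySem.Set.empty c) && bAMOUNT c) = pm1 c := by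
    intro c hc
    simp only [contains_empty]
    cases e1 : bAMOUNT c <;> simp [pm1, e1]
  have h2 : ∀ c ∈ columns,
      (!(PySem.Set.contains (PySem.Set.update PySem.Set.empty (columns.filter pm1)) c) && bRECEIVER c) = pm2 c := by
    intro c hc
    simp only [contains_update_filter, contains_empty, hc, decide_true, Bool.true_and, Bool.false_or]
    cases e1 : bAMOUNT c <;> cases e2 : bRECEIVER c <;> simp [pm1, pm2, e1, e2]
  have h3 : ∀ c ∈ columns,
      (!(PySem.Set.contains (PySem.Set.update (PySem.Set.update PySem.Set.empty (columns.filter pm1)) (columns.filter pm2)) c) && bPORTFOLIO c) = pm3 c := by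
    intro c hc
    simp only [contains_update_filter, contains_empty, hc, decide_true, Bool.true_and, Bool.false_or]
    cases e1 : bAMOUNT c <;> cases e2 : bRECEIVER c <;> cases e3 : bPORTFOLIO c <;>
      simp [pm1, pm2, pm3, e1, e2, e3]
  have h4 : ∀ c ∈ columns,
      (!(PySem.Set.contains (PySem.Set.update (PySem.Set.update (PySem.Set.update PySem.Set.empty (columns.filter pm1)) (columns.filter pm2)) (columns.filter pm3)) c) && bTEMPORAL c) = pm4 c := by
    intro c hc
    simp only [contains_update_filter, contains_empty, hc, decide_true, Bool.true_and, Bool.false_or]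
    cases e1 : bAMOUNT c <;> cases e2 : bRECEIVER c <;> cases e3 : bPORTFOLIO c <;>
      cases e4 : bTEMPORAL c <;> simp [pm1, pm2, pm3, pm4, e1, e2, e3, e4]
  have h5 : ∀ c ∈ columns,
      (!(PySem.Set.contains (PySem.Set.update (PySem.Set.update (PySem.Set.update (PySem.Set.update PySem.Set.empty (columns.filter pm1)) (columns.filter pm2)) (columns.filter pm3)) (columns.filter pm4)) c) && bCURRENCY c) = pm5 c := by
    intro c hc
    simp only [contains_update_filter, contains_empty, hc, decide_true, Bool.true_and, Bool.false_or]
    cases e1 : bAMOUNT c <;> cases e2 : bRECEIVER c <;> cases e3 : bPORTFOLIO c <;>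
      cases e4 : bTEMPORAL c <;> cases e5 : bCURRENCY c <;>
      simp [pm1, pm2, pm3, pm4, pm5, e1, e2, e3, e4, e5]
  have h6 : ∀ c ∈ columns,
      (!(PySem.Set.contains (PySem.Set.update (PySem.Set.update (PySem.Set.update (PySem.Set.update (PySem.Set.update PySem.Set.empty (columns.filter pm1)) (columns.filter pm2)) (columns.filter pm3)) (columns.filter pm4)) (columns.filter pm5)) c) && bCOMPOSITE c) = pm6 c := by
    intro c hc
    simp only [contains_update_filter, contains_empty, hc, decide_true, Bool.true_and, Bool.false_or]
    cases e1 : bAMOUNT c <;> cases e2 : bRECEIVER c <;> cases e3 : bPORTFOLIO c <;>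
      cases e4 : bTEMPORAL c <;> cases e5 : bCURRENCY c <;> cases e6 : bCOMPOSITE c <;>
      simp [pm1, pm2, pm3, pm4, pm5, pm6, e1, e2, e3, e4, e5, e6]
  have h7 : ∀ c ∈ columns,
      (!(PySem.Set.contains (PySem.Set.update (PySem.Set.update (PySem.Set.update (PySem.Set.update (PySem.Set.update (PySem.Set.update PySem.Set.empty (columns.filter pm1)) (columns.filter pm2)) (columns.filter pm3)) (columns.filter pm4)) (columns.filter pm5)) (columns.filter pm6)) c) && bTXCOUNT c) = pm7 c := by
    intro c hc
    simp only [contains_update_filter, contains_empty, hc, decide_true, Bool.true_and, Bool.false_or]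
    cases e1 : bAMOUNT c <;> cases e2 : bRECEIVER c <;> cases e3 : bPORTFOLIO c <;>
      cases e4 : bTEMPORAL c <;> cases e5 : bCURRENCY c <;> cases e6 : bCOMPOSITE c <;>
      cases e7 : bTXCOUNT c <;>
      simp [pm1, pm2, pm3, pm4, pm5, pm6, pm7, e1, e2, e3, e4, e5, e6, e7]
  simp only [dedupSpec]
  rw [kept_eq _ _ _ _ h1, kept_eq _ _ _ _ h2, kept_eq _ _ _ _ h3, kept_eq _ _ _ _ h4,
      kept_eq _ _ _ _ h5, kept_eq _ _ _ _ h6, kept_eq _ _ _ _ h7]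

lemma filt_cons (k : String) (v : List String) (t : List (String × List String)) :
    List.filter (fun kv => !kv.2.isEmpty) ((k, v) :: t)
      = (if v.isEmpty then [] else [(k, v)]) ++ List.filter (fun kv => !kv.2.isEmpty) t := by
  rw [List.filter_cons]; cases v.isEmpty <;> simp

theorem resolve_groups_py_spec : Claim_equal_resolve_groups_py := by
  intro columns _
  unfold Spec_resolve_groups_py
  -- A side
  conv_lhs =>
    rw [resolve_groups_py]
    rw [pick_amt, pick_recv, pick_port, pick_temp, pick_ccy, pick_flag, dict6, getd6, tx_split,
        amt_split, dict7, keys7]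
  have hli := loop_items
      [("AMOUNT", columns.filter bAMOUNT), ("RECEIVER", columns.filter bRECEIVER),
       ("PORTFOLIO", columns.filter bPORTFOLIO), ("TEMPORAL", columns.filter bTEMPORAL),
       ("CURRENCY", columns.filter bCURRENCY), ("COMPOSITE", columns.filter bCOMPOSITE),
       ("TX_COUNT", columns.filter bTXCOUNT)] []
      ["AMOUNT", "RECEIVER", "PORTFOLIO", "TEMPORAL", "CURRENCY", "COMPOSITE", "TX_COUNT"]
      PySem.Set.empty rfl
      (by simp only [List.nil_append, List.map_cons, List.map_nil]; decide)
  simp only [List.nil_append] at hli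
  rw [hli, dedup_eval]
  -- B side
  simp only [resolve_groups_py_alt]
  rw [bfold]
  simp only [List.nil_append, filt_cons, List.filter_nil]
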